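-- pv_equiv track=rewrite | github.com/yurrrri/algorithm_solving | 프로그래머스/1/178871. 달리기 경주/달리기 경주.py | solution
-- ===== SOURCE A (Python) =====
-- def solution(players, callings):
--     player_rank = {}   # key-value: 선수-순위
--     rank_player = {}   # key-value: 순위-선수
--
--     for i, player in enumerate(players):
--         player_rank[player] = i + 1
--         rank_player[i+1] = player
--
--     for call in callings:
--         call_rank = player_rank[call]   # 불린 말의 현재 순위
--         former = rank_player[call_rank-1]  # 앞 플레이어
--         former_rank = call_rank - 1     # 앞 플레이어 순위
--
--         # 순서 바꾸기
--         player_rank[call] = former_rank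
--         rank_player[former_rank] = call
--
--         player_rank[former] = call_rank
--         rank_player[call_rank] = former
--
--     return sorted(player_rank.keys(), key=lambda x:player_rank[x])
-- ===== SOURCE B (Python) =====
-- def solution(players, callings):
--     n = len(players)
--     rank = {}                  # runner -> current 1-based rank
--     board = list(players)      # board[i] is the runner ranked i+1
--     for i, p in enumerate(players):
--         rank[p] = i + 1
--     for c in callings:
--         r = rank[c]
--         f = board[r - 2]       # the runner just ahead
--         board[r - 2] = c
--         board[r - 1] = f
--         rank[c] = r - 1
--         rank[f] = r
--     buckets = [[] for _ in range(n + 1)]   # counting readout: no comparison sort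
--     for p, r in rank.items():
--         buckets[r].append(p)
--     return [p for b in buckets for p in b]
-- ===== Notes on version B (the rewrite author's own statement) =====
-- stated objective: alternative
-- what changed: B replaces A's rank->player dict by a plain board list indexed by rank and replaces A's final comparison sort of the names by rank by a counting-bucket readout; Pre_ excludes exactly the inputs on which A raises KeyError (a calling naming an unknown runner or the current leader).
import Mathlib
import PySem

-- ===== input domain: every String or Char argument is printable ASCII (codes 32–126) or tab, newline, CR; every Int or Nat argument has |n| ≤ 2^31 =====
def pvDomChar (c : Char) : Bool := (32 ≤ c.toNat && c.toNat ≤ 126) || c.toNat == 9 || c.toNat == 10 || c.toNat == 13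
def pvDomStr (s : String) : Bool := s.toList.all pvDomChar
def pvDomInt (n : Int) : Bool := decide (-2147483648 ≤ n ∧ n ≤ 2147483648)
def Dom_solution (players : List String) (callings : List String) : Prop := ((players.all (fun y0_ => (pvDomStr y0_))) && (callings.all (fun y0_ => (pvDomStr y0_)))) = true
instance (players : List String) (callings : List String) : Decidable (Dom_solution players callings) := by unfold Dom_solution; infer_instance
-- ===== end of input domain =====

-- B replaces A's rank→player dict by a plain board list indexed by rank and A's final
-- comparison sort of the names by rank by a counting-bucket readout (objective: alternative).

-- ===== PORT A =====
-- the body of A's `for call in callings` loop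
def pvStepA (st : PySem.Dict String Int × PySem.Dict Int String) (call : String) :
    PySem.Dict String Int × PySem.Dict Int String :=
  let call_rank := st.1.getD call 0          -- player_rank[call]; KeyError excluded by Pre_
  let former := st.2.getD (call_rank - 1) "" -- rank_player[call_rank-1]; KeyError excluded by Pre_
  let former_rank := call_rank - 1
  ((st.1.insert call former_rank).insert former call_rank,
   (st.2.insert former_rank call).insert call_rank former)

def solution (players : List String) (callings : List String) : List String :=
  -- the two dict-building enumerate loops fused into one fold over enumerate(players)
  let init : PySem.Dict String Int × PySem.Dict Int String :=
    (PySem.List.enumerate players 0).foldl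
      (fun st ip => (st.1.insert ip.2 (ip.1 + 1), st.2.insert (ip.1 + 1) ip.2))
      (PySem.Dict.empty, PySem.Dict.empty)
  let st := callings.foldl pvStepA init
  PySem.List.sorted st.1.keys (fun x => st.1.getD x 0)

-- ===== PORT B =====
-- the body of B's `for c in callings` loop: st = (board, rank)
def pvStepB (st : List String × PySem.Dict String Int) (c : String) :
    List String × PySem.Dict String Int :=
  let r := st.2.getD c 0                      -- rank[c]; KeyError excluded by Pre_
  let f := PySem.List.pyGetD st.1 (r - 2) ""  -- board[r-2]
  (PySem.List.pySetD (PySem.List.pySetD st.1 (r - 2) c) (r - 1) f,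
   (st.2.insert c (r - 1)).insert f r)

def solution_alt (players : List String) (callings : List String) : List String :=
  let rank0 : PySem.Dict String Int :=
    (PySem.List.enumerate players 0).foldl (fun d ip => d.insert ip.2 (ip.1 + 1))
      PySem.Dict.empty
  let st := callings.foldl pvStepB (players, rank0)
  let buckets0 : List (List String) :=
    (PySem.List.pyRange 0 ((players.length : Int) + 1) 1).map (fun _ => [])
  let buckets := st.2.items.foldl
    (fun bs pr => PySem.List.pySetD bs pr.2 (PySem.List.pyGetD bs pr.2 [] ++ [pr.1]))
    buckets0
  buckets.flatten

-- ===== PRECONDITION & SPEC =====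
-- B's/A's initial name→rank dict (duplicates collapse to the last occurrence, as in Python)
def pvInit (players : List String) : PySem.Dict String Int :=
  (PySem.List.enumerate players 0).foldl (fun d ip => d.insert ip.2 (ip.1 + 1))
    PySem.Dict.empty

-- race validity replayed on the rank board: every calling names a known runner that is not
-- currently in first place; whether a call hits the leader depends on the evolving ranks, so
-- this replays the swaps — it is exactly the original problem's guarantee on the input, and
-- exactly where A raises no KeyError
def pvOk (board : List String) (rank : PySem.Dict String Int) : List String → Bool
  | [] => true
  | c :: rest =>
    match rank.get? c with
    | none => false
    | some r =>
      if r ≤ 1 then false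
      else
        let f := board.getD (r - 2).toNat ""
        pvOk ((board.set (r - 2).toNat c).set (r - 1).toNat f)
          ((rank.insert c (r - 1)).insert f r) rest

-- Pre_ is exactly the set of inputs on which A returns normally (raises no KeyError)
def Pre_solution (players : List String) (callings : List String) : Prop :=
  pvOk players (pvInit players) callings = true
instance (players : List String) (callings : List String) : Decidable (Pre_solution players callings) := by unfold Pre_solution; infer_instance
def pvWitness_solution : List String × List String := (["a", "b", "c"], ["b", "c", "c"])

def Spec_solution (players : List String) (callings : List String) (out : List String) : Prop := out = solution_alt players callings
instance (players : List String) (callings : List String) (out : List String) : Decidable (Spec_solution players callings out) := by unfold Spec_solution; infer_instance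

-- ===== CLAIM (what is proved, stated in full; the proofs are below) =====
def Claim_equal_solution : Prop := ∀ (players : List String) (callings : List String), Dom_solution players callings → Pre_solution players callings → Spec_solution players callings (solution players callings)

-- ===== LEMMAS AND PROOFS =====

-- the coupling invariant: every dict entry points back into the board, with ranks in 1..n
def pvInv (n : Nat) (board : List String) (rank : PySem.Dict String Int) : Prop :=
  board.length = n ∧ rank.keys.Nodup ∧
  (∀ kv ∈ rank.items, 1 ≤ kv.2 ∧ kv.2 ≤ (n : Int) ∧ board.getD (kv.2 - 1).toNat "" = kv.1) ∧
  (∀ q ∈ board, rank.contains q = true)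

-- enumerate over a list as a map over its index range
lemma pv_enumerate_eq_range (P : List String) :
    ∀ s : Int, PySem.List.enumerate P s
      = (List.range P.length).map (fun (j : Nat) => (s + (j : Int), P.getD j "")) := by
  induction P with
  | nil => intro s; simp [PySem.List.enumerate]
  | cons x xs ih =>
    intro s
    rw [PySem.List.enumerate_cons, ih (s + 1)]
    simp only [List.length_cons, List.range_succ_eq_map, List.map_cons, List.map_map]
    congr 1
    · simp
    · apply List.map_congr_left
      intro j hj
      simp only [Function.comp_apply, List.getD_cons_succ]
      congr 1
      push_cast
      ring

lemma pv_enumerate_snoc (xs : List String) (x : String) :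
    PySem.List.enumerate (xs ++ [x]) 0
      = PySem.List.enumerate xs 0 ++ [((xs.length : Int), x)] := by
  rw [pv_enumerate_eq_range, pv_enumerate_eq_range]
  simp only [List.length_append, List.length_singleton, List.range_succ, List.map_append,
    List.map_cons, List.map_nil]
  congr 1
  · apply List.map_congr_left
    intro j hj
    have hj' : j < xs.length := List.mem_range.mp hj
    rw [List.getD_append _ _ _ _ hj']
  · have h1 : (xs ++ [x]).getD xs.length "" = x := by
      have hlen : xs.length < (xs ++ [x]).length := by simp
      rw [List.getD_eq_getElem _ "" hlen]
      simp
    rw [h1]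
    norm_num

-- index of the LAST occurrence of p in players
def pvLast (players : List String) (p : String) : Nat :=
  players.length - 1 - players.reverse.idxOf p

lemma pvLast_lt (players : List String) {p : String} (hp : p ∈ players) :
    pvLast players p < players.length := by
  have h1 : players.reverse.idxOf p < players.length := by
    simpa using List.idxOf_lt_length_of_mem (by simpa using hp : p ∈ players.reverse)
  unfold pvLast
  omega

lemma getElem_pvLast (players : List String) {p : String} (hp : p ∈ players) :
    players[pvLast players p]'(pvLast_lt players hp) = p := by
  have hm : p ∈ players.reverse := by simpa using hp
  have hi : players.reverse.idxOf p < players.reverse.length := List.idxOf_lt_length_of_mem hm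
  have h2 := List.getElem_idxOf hi
  rw [List.getElem_reverse] at h2
  have h3 : players.length - 1 - players.reverse.idxOf p = pvLast players p := rfl
  simp only [h3] at h2
  exact h2

lemma pvLast_snoc_self (xs : List String) (x : String) :
    pvLast (xs ++ [x]) x = xs.length := by
  have hrev : (xs ++ [x]).reverse = x :: xs.reverse := by simp
  rw [pvLast, hrev, List.idxOf_cons_self]
  simp

lemma pvLast_snoc_ne (xs : List String) (x : String) {p : String} (hne : p ≠ x)
    (hp : p ∈ xs) : pvLast (xs ++ [x]) p = pvLast xs p := by
  have h1 : xs.reverse.idxOf p < xs.length := by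
    simpa using List.idxOf_lt_length_of_mem (by simpa using hp : p ∈ xs.reverse)
  simp only [pvLast, List.reverse_append, List.reverse_cons, List.reverse_nil,
    List.nil_append, List.singleton_append, List.length_append, List.length_singleton,
    List.idxOf_cons_ne _ (Ne.symm hne)]
  omega

-- the init dict holds the last occurrence's rank
lemma pv_getD_init (players : List String) :
    ∀ p ∈ players, (pvInit players).getD p 0 = ((pvLast players p : Nat) : Int) + 1 := by
  induction players using List.reverseRecOn with
  | nil => intro p hp; simp at hp
  | append_singleton xs x ih =>
    intro p hp
    rw [pvInit, pv_enumerate_snoc, List.foldl_append]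
    simp only [List.foldl_cons, List.foldl_nil]
    by_cases hpx : p = x
    · subst hpx
      rw [PySem.Dict.getD_insert_self, pvLast_snoc_self]
    · have hpxs : p ∈ xs := by
        rcases List.mem_append.mp hp with h | h
        · exact h
        · simp at h; exact absurd h hpx
      rw [PySem.Dict.getD_insert_of_ne _ _ _ hpx]
      rw [show (List.foldl (fun d ip => d.insert ip.2 (ip.1 + 1)) PySem.Dict.empty
          (PySem.List.enumerate xs 0)) = pvInit xs from rfl]
      rw [ih p hpxs, pvLast_snoc_ne xs x hpx hpxs]

lemma pv_keys_init (players : List String) :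
    (pvInit players).keys = PySem.Set.ofList players := by
  calc (pvInit players).keys
      = PySem.Set.update PySem.Dict.empty.keys
          ((PySem.List.enumerate players 0).map (fun ip => ip.2)) :=
        PySem.Dict.keys_foldl_insert_key (PySem.List.enumerate players 0) (fun ip => ip.2)
          (fun _ ip => ip.1 + 1) PySem.Dict.empty
    _ = PySem.Set.ofList players := by
        rw [PySem.List.map_snd_enumerate, PySem.Dict.keys_empty]
        rfl

lemma pv_keys_init_nodup (players : List String) : (pvInit players).keys.Nodup :=
  PySem.Dict.nodup_keys_foldl_insert_key (PySem.List.enumerate players 0) (fun ip => ip.2)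
    (fun _ ip => ip.1 + 1) PySem.Dict.empty (by rw [PySem.Dict.keys_empty]; exact List.nodup_nil)

-- A's initial rank→player dict, as items
lemma pv_rp0_items (P : List String) :
    ((PySem.List.enumerate P 0).foldl (fun d ip => d.insert (ip.1 + 1) ip.2)
        PySem.Dict.empty).items
      = (List.range P.length).map (fun (s : Nat) => ((s : Int) + 1, P.getD s "")) := by
  rw [PySem.Dict.items_foldl_insert_fresh (PySem.List.enumerate P 0) (fun ip => ip.1 + 1)
      (fun ip => ip.2) PySem.Dict.empty (by intro a _; rfl) ?_]
  · rw [pv_enumerate_eq_range P 0]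
    simp only [List.map_map]
    have : (PySem.Dict.empty : PySem.Dict Int String).items = [] := rfl
    rw [this, List.nil_append]
    apply List.map_congr_left
    intro j hj
    simp
  · rw [pv_enumerate_eq_range P 0]
    simp only [List.map_map]
    refine List.Nodup.map ?_ List.nodup_range
    intro a b hab
    simp only [Function.comp_apply] at hab
    omega

-- getD out of an Int-keyed dict whose items run over ranks 1..n
lemma pv_rpD (n : Nat) (d : PySem.Dict Int String) (h : Nat → String)
    (hd : d.items = (List.range n).map (fun (s : Nat) => ((s : Int) + 1, h s)))
    (s : Nat) (hs : s < n) : d.getD ((s : Int) + 1) "" = h s := by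
  refine PySem.Dict.getD_of_mem_items d ?_ ?_ ""
  · rw [hd]; exact List.mem_map.mpr ⟨s, List.mem_range.mpr hs, rfl⟩
  · show (d.items.map (fun p => p.1)).Nodup
    rw [hd, List.map_map]
    refine List.Nodup.map ?_ List.nodup_range
    intro a b hab
    simp only [Function.comp_apply] at hab
    omega

-- keys of an Int-keyed dict whose items run over ranks 1..n
lemma pv_rp_keys (n : Nat) (d : PySem.Dict Int String) (h : Nat → String)
    (hd : d.items = (List.range n).map (fun (s : Nat) => ((s : Int) + 1, h s))) :
    d.keys = (List.range n).map (fun (s : Nat) => (s : Int) + 1) := by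
  show d.items.map (fun p => p.1) = _
  rw [hd, List.map_map]
  rfl

-- the main simulation invariant: A's two dicts track B's board and rank dict; the name→rank
-- dicts of the two programs stay literally equal
lemma pv_loop (n : Nat) :
    ∀ (cs : List String) (board : List String) (rank : PySem.Dict String Int)
      (rp : PySem.Dict Int String),
      pvInv n board rank →
      rp.items = (List.range n).map (fun (i : Nat) => ((i : Int) + 1, board.getD i "")) →
      pvOk board rank cs = true →
      (cs.foldl pvStepA (rank, rp)).1 = (cs.foldl pvStepB (board, rank)).2 ∧
      (cs.foldl pvStepA (rank, rp)).2.items = (List.range n).map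
        (fun (i : Nat) => ((i : Int) + 1, (cs.foldl pvStepB (board, rank)).1.getD i "")) ∧
      pvInv n (cs.foldl pvStepB (board, rank)).1 (cs.foldl pvStepB (board, rank)).2 := by
  intro cs
  induction cs with
  | nil =>
    intro board rank rp hinv hrp _
    exact ⟨rfl, hrp, hinv⟩
  | cons c rest ih =>
    intro board rank rp hinv hrp hok
    obtain ⟨hlb, hnd, hitems, hcont⟩ := hinv
    rw [pvOk] at hok
    cases hg : rank.get? c with
    | none => rw [hg] at hok; exact absurd hok (by simp)
    | some r =>
      rw [hg] at hok
      replace hok : (if r ≤ 1 then false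
          else pvOk ((board.set (r - 2).toNat c).set (r - 1).toNat (board.getD (r - 2).toNat ""))
            ((rank.insert c (r - 1)).insert (board.getD (r - 2).toNat "") r) rest) = true := hok
      by_cases hr1 : r ≤ 1
      · rw [if_pos hr1] at hok; exact absurd hok (by simp)
      · rw [if_neg hr1] at hok
        have hcr : (c, r) ∈ rank.items := PySem.Dict.mem_items_of_get?_eq_some rank hg
        obtain ⟨hb1, hb2, hb3⟩ := hitems _ hcr
        replace hb3 : board.getD (r - 1).toNat "" = c := hb3
        set t : Nat := r.toNat with htdef
        have hb3t : board.getD (t - 1) "" = c := by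
          rw [show t - 1 = (r - 1).toNat from by omega]
          exact hb3
        have ht2 : 2 ≤ t := by omega
        have htn : t ≤ n := by omega
        have hrt : r = (t : Int) := by omega
        -- the runner just ahead
        have hf2 : (r - 2).toNat = t - 2 := by omega
        have hf1 : (r - 1).toNat = t - 1 := by omega
        set f : String := board.getD (t - 2) "" with hfdef
        have hfmem : f ∈ board := by
          rw [hfdef, List.getD_eq_getElem _ "" (by omega)]
          exact List.getElem_mem _
        have hcf : rank.contains f = true := hcont f hfmem
        -- the B step in closed form
        have e_r : rank.getD c 0 = r := PySem.Dict.getD_of_get?_eq_some rank 0 hg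
        have e_f : PySem.List.pyGetD board (r - 2) "" = f := by
          rw [show r - 2 = ((t - 2 : Nat) : Int) from by omega, PySem.List.pyGetD_natCast]
        have eB1 : PySem.List.pySetD board (r - 2) c = board.set (t - 2) c := by
          rw [show r - 2 = ((t - 2 : Nat) : Int) from by omega, PySem.List.pySetD_natCast]
        have eB2 : PySem.List.pySetD (board.set (t - 2) c) (r - 1) f
            = (board.set (t - 2) c).set (t - 1) f := by
          rw [show r - 1 = ((t - 1 : Nat) : Int) from by omega, PySem.List.pySetD_natCast]
        have hstepB : pvStepB (board, rank) c
            = ((board.set (t - 2) c).set (t - 1) f, (rank.insert c (r - 1)).insert f r) := by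
          simp only [pvStepB]
          rw [e_r, e_f, eB1, eB2]
        -- the A step in closed form
        have hrpk : rp.keys = (List.range n).map (fun (s : Nat) => (s : Int) + 1) :=
          pv_rp_keys n rp _ hrp
        have e_former : rp.getD (r - 1) "" = f := by
          rw [show r - 1 = ((t - 2 : Nat) : Int) + 1 from by omega,
            pv_rpD n rp _ hrp (t - 2) (by omega)]
        have hstepA : pvStepA (rank, rp) c
            = ((rank.insert c (r - 1)).insert f r,
               (rp.insert (r - 1) c).insert r f) := by
          simp only [pvStepA]
          rw [e_r, e_former]
        -- the board after the swap, pointwise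
        have hboard' : ∀ i : Nat, i < n →
            ((board.set (t - 2) c).set (t - 1) f).getD i ""
              = if i = t - 1 then f else if i = t - 2 then c else board.getD i "" := by
          intro i hi
          have hsl : i < ((board.set (t - 2) c).set (t - 1) f).length := by
            simp only [List.length_set]; omega
          have hb2' : i < (board.set (t - 2) c).length := by
            simp only [List.length_set]; omega
          rw [List.getD_eq_getElem _ "" hsl, List.getElem_set hsl, List.getElem_set hb2']
          by_cases h1 : i = t - 1
          · rw [if_pos h1.symm, if_pos h1]
          · by_cases h2 : i = t - 2
            · rw [if_neg (fun h => h1 h.symm), if_pos h2.symm, if_neg h1, if_pos h2]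
            · rw [if_neg (fun h => h1 h.symm), if_neg (fun h => h2 h.symm), if_neg h1,
                if_neg h2, List.getD_eq_getElem board "" (by omega)]
        -- rp stays coupled to the board
        have hcr1 : rp.contains (r - 1) = true := by
          rw [PySem.Dict.contains_eq_decide_mem_keys, hrpk]
          refine decide_eq_true_iff.mpr (List.mem_map.mpr ⟨t - 2, List.mem_range.mpr (by omega),
            by omega⟩)
        have hcr2 : (rp.insert (r - 1) c).contains r = true := by
          rw [PySem.Dict.contains_insert, PySem.Dict.contains_eq_decide_mem_keys, hrpk]
          rw [Bool.or_eq_true]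
          exact Or.inr (decide_eq_true_iff.mpr (List.mem_map.mpr ⟨t - 1,
            List.mem_range.mpr (by omega), by omega⟩))
        have hrp' : ((rp.insert (r - 1) c).insert r f).items = (List.range n).map
            (fun (i : Nat) => ((i : Int) + 1,
              ((board.set (t - 2) c).set (t - 1) f).getD i "")) := by
          rw [PySem.Dict.items_insert_of_contains _ _ hcr2,
            PySem.Dict.items_insert_of_contains _ _ hcr1, hrp, List.map_map, List.map_map]
          apply List.map_congr_left
          intro i hi
          have hin : i < n := List.mem_range.mp hi
          simp only [Function.comp_apply, beq_iff_eq]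
          rw [hboard' i hin]
          by_cases h1 : i = t - 2
          · rw [if_pos (show (i : Int) + 1 = r - 1 from by omega),
              if_neg (show ¬((r - 1 : Int) = r) from by omega), if_neg (by omega : ¬(i = t - 1)),
              if_pos h1]
            simp only [Prod.mk.injEq]
            exact ⟨by omega, trivial⟩
          · by_cases h2 : i = t - 1
            · rw [if_neg (show ¬((i : Int) + 1 = r - 1) from by omega),
                if_pos (show (i : Int) + 1 = r from by omega), if_pos h2]
              simp only [Prod.mk.injEq]
              exact ⟨by omega, trivial⟩
            · rw [if_neg (show ¬((i : Int) + 1 = r - 1) from by omega),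
                if_neg (show ¬((i : Int) + 1 = r) from by omega), if_neg h2, if_neg h1]
        -- the invariant is preserved
        have hinv' : pvInv n ((board.set (t - 2) c).set (t - 1) f)
            ((rank.insert c (r - 1)).insert f r) := by
          refine ⟨by simp only [List.length_set]; exact hlb,
            PySem.Dict.nodup_keys_insert _ _ _ (PySem.Dict.nodup_keys_insert _ _ _ hnd), ?_, ?_⟩
          · intro kv hkv
            rcases (PySem.Dict.mem_items_insert _ _ _ _).mp hkv with h | ⟨hkv2, hne1⟩
            · rw [h]
              refine ⟨by omega, by omega, ?_⟩
              rw [hf1, hboard' (t - 1) (by omega), if_pos rfl]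
            · rcases (PySem.Dict.mem_items_insert _ _ _ _).mp hkv2 with h | ⟨hkv3, hne2⟩
              · rw [h]
                refine ⟨by omega, by omega, ?_⟩
                rw [show (r - 1 - 1).toNat = t - 2 from by omega, hboard' (t - 2) (by omega),
                  if_neg (by omega : ¬(t - 2 = t - 1)), if_pos rfl]
              · obtain ⟨hk1, hk2, hk3⟩ := hitems kv hkv3
                refine ⟨hk1, hk2, ?_⟩
                rw [hboard' (kv.2 - 1).toNat (by omega)]
                rw [if_neg ?_, if_neg ?_]
                · exact hk3
                · intro h
                  rw [h] at hk3
                  apply hne1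
                  have : kv.1 = f := by rw [← hk3]
                  exact this
                · intro h
                  rw [h] at hk3
                  apply hne2
                  have : kv.1 = c := by rw [← hk3]; exact hb3t
                  exact this
          · intro q hq
            rcases List.mem_or_eq_of_mem_set hq with hq1 | hq1
            · rcases List.mem_or_eq_of_mem_set hq1 with hq2 | hq2
              · rw [PySem.Dict.contains_insert, PySem.Dict.contains_insert]
                simp [hcont _ hq2]
              · rw [PySem.Dict.contains_insert, PySem.Dict.contains_insert]
                simp [hq2]
            · rw [PySem.Dict.contains_insert]
              simp [hq1]
        -- the replay continues with exactly these states
        have hok' : pvOk ((board.set (t - 2) c).set (t - 1) f)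
            ((rank.insert c (r - 1)).insert f r) rest = true := by
          rw [show (board.set (t - 2) c).set (t - 1) f
              = (board.set (r - 2).toNat c).set (r - 1).toNat (board.getD (r - 2).toNat "")
            from by rw [hf1, hf2]]
          rw [show (rank.insert c (r - 1)).insert f r
              = (rank.insert c (r - 1)).insert (board.getD (r - 2).toNat "") r
            from by rw [hf2]]
          exact hok
        simp only [List.foldl_cons]
        rw [hstepA, hstepB]
        exact ih ((board.set (t - 2) c).set (t - 1) f)
          ((rank.insert c (r - 1)).insert f r) ((rp.insert (r - 1) c).insert r f)
          hinv' hrp' hok'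

-- a list of length at most one is pairwise for any relation and has no duplicates
lemma pv_short_pairwise {α : Type} (l : List α) (R : α → α → Prop) (h : l.length ≤ 1) :
    l.Pairwise R := by
  match l, h with
  | [], _ => exact List.Pairwise.nil
  | [x], _ => exact List.pairwise_singleton R x

-- a list of length at most one has no duplicates
lemma pv_short_nodup {α : Type} (l : List α) (h : l.length ≤ 1) : l.Nodup := by
  match l, h with
  | [], _ => exact List.nodup_nil
  | [x], _ => exact List.nodup_singleton x

-- the bucket fold keeps the length
lemma pv_buck_len (its : List (String × Int)) :
    ∀ bs : List (List String),
      (its.foldl (fun bs pr =>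
          PySem.List.pySetD bs pr.2 (PySem.List.pyGetD bs pr.2 [] ++ [pr.1])) bs).length
        = bs.length := by
  induction its with
  | nil => intro bs; rfl
  | cons kv rest ih =>
    intro bs
    rw [List.foldl_cons, ih]
    exact PySem.List.length_pySetD _ _ _

-- the bucket fold appends each name to the bucket of its rank
lemma pv_buck_getD (its : List (String × Int)) :
    ∀ bs : List (List String), (∀ kv ∈ its, 0 ≤ kv.2 ∧ kv.2 < (bs.length : Int)) →
      ∀ i : Nat, i < bs.length →
      (its.foldl (fun bs pr =>
          PySem.List.pySetD bs pr.2 (PySem.List.pyGetD bs pr.2 [] ++ [pr.1])) bs).getD i []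
        = bs.getD i [] ++ (its.filter (fun kv => kv.2 == (i : Int))).map (fun kv => kv.1) := by
  induction its with
  | nil => intro bs _ i hi; simp
  | cons kv rest ih =>
    intro bs hb i hi
    obtain ⟨hk0, hk1⟩ := hb kv (List.mem_cons_self)
    have hkl : kv.2.toNat < bs.length := by omega
    have e1 : PySem.List.pyGetD bs kv.2 [] = bs.getD kv.2.toNat [] := by
      rw [PySem.List.pyGetD_eq_getElem _ _ hk0 (by exact_mod_cast hk1),
        List.getD_eq_getElem _ _ hkl]
    have e2 : PySem.List.pySetD bs kv.2 (bs.getD kv.2.toNat [] ++ [kv.1])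
        = bs.set kv.2.toNat (bs.getD kv.2.toNat [] ++ [kv.1]) :=
      PySem.List.pySetD_of_nonneg _ _ hk0
    rw [List.foldl_cons, e1, e2, ih _ ?_ i ?_]
    · have hgset : (bs.set kv.2.toNat (bs.getD kv.2.toNat [] ++ [kv.1])).getD i []
          = if kv.2.toNat = i then bs.getD i [] ++ [kv.1] else bs.getD i [] := by
        have hil : i < (bs.set kv.2.toNat (bs.getD kv.2.toNat [] ++ [kv.1])).length := by
          simp only [List.length_set]; omega
        rw [List.getD_eq_getElem _ [] hil]
        simp only [List.getElem_set]
        by_cases h : kv.2.toNat = i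
        · rw [if_pos h, if_pos h, h]
        · rw [if_neg h, if_neg h]
          exact (List.getD_eq_getElem bs [] (by omega)).symm
      rw [hgset, List.filter_cons]
      by_cases h : kv.2.toNat = i
      · rw [if_pos (show (kv.2 == (i : Int)) = true from by
            rw [beq_iff_eq]; omega), if_pos h]
        rw [List.map_cons, List.append_assoc]
        rfl
      · rw [if_neg (show ¬((kv.2 == (i : Int)) = true) from by
            rw [beq_iff_eq]; omega), if_neg h]
    · intro kv' hkv'
      have := hb kv' (List.mem_cons_of_mem _ hkv')
      simpa using this
    · simpa using hi

-- inside the invariant, distinct dict entries carry distinct ranks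
lemma pv_inj (n : Nat) (board : List String) (rank : PySem.Dict String Int)
    (hinv : pvInv n board rank) :
    ∀ kv1 ∈ rank.items, ∀ kv2 ∈ rank.items, kv1.2 = kv2.2 → kv1 = kv2 := by
  obtain ⟨hlb, hnd, hitems, _⟩ := hinv
  intro kv1 h1 kv2 h2 hv
  have e1 := (hitems kv1 h1).2.2
  have e2 := (hitems kv2 h2).2.2
  have hk : kv1.1 = kv2.1 := by rw [← e1, ← e2, hv]
  have g1 : rank.get? kv1.1 = some kv1.2 :=
    PySem.Dict.get?_of_mem_items rank (show (kv1.1, kv1.2) ∈ rank.items from by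
      simpa using h1) hnd
  have g2 : rank.get? kv2.1 = some kv2.2 :=
    PySem.Dict.get?_of_mem_items rank (show (kv2.1, kv2.2) ∈ rank.items from by
      simpa using h2) hnd
  rw [hk, g2] at g1
  exact Prod.ext hk (Option.some_inj.mp g1).symm

-- A's sort of the names by rank is B's bucket readout
lemma pv_final (n : Nat) (board : List String) (rank : PySem.Dict String Int)
    (hinv : pvInv n board rank) :
    PySem.List.sorted rank.keys (fun x => rank.getD x 0)
      = (rank.items.foldl (fun bs pr =>
            PySem.List.pySetD bs pr.2 (PySem.List.pyGetD bs pr.2 [] ++ [pr.1]))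
          ((PySem.List.pyRange 0 ((n : Int) + 1) 1).map (fun _ => []))).flatten := by
  obtain ⟨hlb, hnd, hitems, hcont⟩ := hinv
  have hinj := pv_inj n board rank ⟨hlb, hnd, hitems, hcont⟩
  have hndit : rank.items.Nodup :=
    List.Nodup.of_map (fun p => p.1) (show (rank.items.map (fun p => p.1)).Nodup from hnd)
  set bs0 : List (List String) := (PySem.List.pyRange 0 ((n : Int) + 1) 1).map (fun _ => [])
    with hbs0
  have hlen0 : bs0.length = n + 1 := by
    rw [hbs0, List.length_map, PySem.List.length_pyRange_one]
    omega
  have hget0 : ∀ i : Nat, i < n + 1 → bs0.getD i [] = [] := by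
    intro i hi
    have hlt : i < bs0.length := by omega
    rw [List.getD_eq_getElem _ [] hlt]
    have hmem : bs0[i] ∈ bs0 := List.getElem_mem hlt
    have hmem2 : bs0[i] ∈ List.map (fun _ => ([] : List String))
        (PySem.List.pyRange 0 ((n : Int) + 1) 1) := hmem
    obtain ⟨a, _, ha⟩ := List.mem_map.mp hmem2
    exact ha.symm
  have hbnd : ∀ kv ∈ rank.items, 0 ≤ kv.2 ∧ kv.2 < (bs0.length : Int) := by
    intro kv hkv
    have := hitems kv hkv
    rw [hlen0]
    omega
  -- the built buckets, as a map over the rank range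
  have hB : (rank.items.foldl (fun bs pr =>
        PySem.List.pySetD bs pr.2 (PySem.List.pyGetD bs pr.2 [] ++ [pr.1])) bs0)
      = (List.range (n + 1)).map
          (fun (i : Nat) => (rank.items.filter (fun kv => kv.2 == (i : Int))).map
            (fun kv => kv.1)) := by
    apply List.ext_getElem
    · rw [pv_buck_len, hlen0, List.length_map, List.length_range]
    · intro i hi1 hi2
      have hin : i < n + 1 := by
        rw [List.length_map, List.length_range] at hi2; exact hi2
      rw [List.getElem_map]
      rw [← List.getD_eq_getElem _ [] hi1, pv_buck_getD rank.items bs0 hbnd i (by omega),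
        hget0 i hin, List.nil_append]
      simp
  rw [hB]
  -- per-bucket facts
  have hfsub : ∀ (i : Nat) (kv : String × Int),
      kv ∈ rank.items.filter (fun kv => kv.2 == (i : Int)) →
        kv ∈ rank.items ∧ kv.2 = (i : Int) := by
    intro i kv hkv
    have := List.mem_filter.mp hkv
    exact ⟨this.1, by simpa using this.2⟩
  have hshort : ∀ i : Nat,
      (rank.items.filter (fun kv => kv.2 == (i : Int))).length ≤ 1 := by
    intro i
    rcases hf : rank.items.filter (fun kv => kv.2 == (i : Int)) with _ | ⟨x, _ | ⟨y, tl⟩⟩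
    · rw [hf]
      norm_num
    · rw [hf]
      norm_num
    · exfalso
      have hx : x ∈ rank.items.filter (fun kv => kv.2 == (i : Int)) := by
        rw [hf]; exact List.mem_cons_self
      have hy : y ∈ rank.items.filter (fun kv => kv.2 == (i : Int)) := by
        rw [hf]; exact List.mem_cons_of_mem _ List.mem_cons_self
      have hxy : x = y := by
        obtain ⟨hx1, hx2⟩ := hfsub i x hx
        obtain ⟨hy1, hy2⟩ := hfsub i y hy
        exact hinj x hx1 y hy1 (by rw [hx2, hy2])
      have : (rank.items.filter (fun kv => kv.2 == (i : Int))).Nodup := hndit.filter _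
      rw [hf] at this
      exact (List.nodup_cons.mp this).1 (hxy ▸ List.mem_cons_self)
  -- value of the key function on a bucket member
  have hgmem : ∀ (i : Nat) (p : String),
      p ∈ (rank.items.filter (fun kv => kv.2 == (i : Int))).map (fun kv => kv.1) →
        rank.getD p 0 = (i : Int) ∧ p ∈ rank.keys := by
    intro i p hp
    obtain ⟨kv, hkv, rfl⟩ := List.mem_map.mp hp
    obtain ⟨h1, h2⟩ := hfsub i kv hkv
    constructor
    · rw [show kv = (kv.1, kv.2) from rfl] at h1
      rw [PySem.Dict.getD_of_mem_items rank h1 hnd 0]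
      exact h2
    · exact PySem.Dict.mem_keys_of_mem_items rank h1
  -- the flattened buckets are a permutation of the keys
  have hynd : ((List.range (n + 1)).map
      (fun (i : Nat) => (rank.items.filter (fun kv => kv.2 == (i : Int))).map
        (fun kv => kv.1))).flatten.Nodup := by
    rw [List.nodup_flatten]
    constructor
    · intro l hl
      obtain ⟨i, _, rfl⟩ := List.mem_map.mp hl
      exact pv_short_nodup _ (by rw [List.length_map]; exact hshort i)
    · rw [List.pairwise_map]
      refine List.Pairwise.imp_of_mem ?_ List.pairwise_lt_range
      intro a b _ _ hab
      intro p hpa hpb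
      have ha := (hgmem a p hpa).1
      have hb := (hgmem b p hpb).1
      rw [ha] at hb
      omega
  have hperm : ((List.range (n + 1)).map
      (fun (i : Nat) => (rank.items.filter (fun kv => kv.2 == (i : Int))).map
        (fun kv => kv.1))).flatten.Perm rank.keys := by
    rw [List.perm_ext_iff_of_nodup hynd hnd]
    intro p
    constructor
    · intro hp
      obtain ⟨l, hl, hpl⟩ := List.mem_flatten.mp hp
      obtain ⟨i, _, rfl⟩ := List.mem_map.mp hl
      exact (hgmem i p hpl).2
    · intro hp
      have hp' : p ∈ rank.items.map (fun q => q.1) := hp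
      obtain ⟨kv, hkv, rfl⟩ := List.mem_map.mp hp'
      obtain ⟨h1, h2, _⟩ := hitems kv hkv
      refine List.mem_flatten.mpr ⟨(rank.items.filter
          (fun kv' => kv'.2 == (kv.2.toNat : Int))).map (fun kv' => kv'.1), ?_, ?_⟩
      · exact List.mem_map.mpr ⟨kv.2.toNat, List.mem_range.mpr (by omega), rfl⟩
      · refine List.mem_map.mpr ⟨kv, List.mem_filter.mpr ⟨hkv, ?_⟩, rfl⟩
        rw [beq_iff_eq]
        omega
  have hpw : ((List.range (n + 1)).map
      (fun (i : Nat) => (rank.items.filter (fun kv => kv.2 == (i : Int))).map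
        (fun kv => kv.1))).flatten.Pairwise
      (fun a b => (fun x => rank.getD x 0) a < (fun x => rank.getD x 0) b) := by
    rw [List.pairwise_flatten]
    constructor
    · intro l hl
      obtain ⟨i, _, rfl⟩ := List.mem_map.mp hl
      exact pv_short_pairwise _ _ (by rw [List.length_map]; exact hshort i)
    · rw [List.pairwise_map]
      refine List.Pairwise.imp_of_mem ?_ List.pairwise_lt_range
      intro a b _ _ hab
      intro p hpa q hpb
      have ha := (hgmem a p hpa).1
      have hb := (hgmem b q hpb).1
      simp only []
      rw [ha, hb]
      omega
  exact PySem.List.sorted_eq_of_perm_of_pairwise_lt _ _ _ hperm hpw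

-- the initial state satisfies the invariant
lemma pv_inv_init (P : List String) : pvInv P.length P (pvInit P) := by
  refine ⟨rfl, pv_keys_init_nodup P, ?_, ?_⟩
  · intro kv hkv
    have hmemk : kv.1 ∈ P := by
      have := PySem.Dict.mem_keys_of_mem_items _ hkv
      rw [pv_keys_init] at this
      exact (PySem.Set.mem_ofList P kv.1).mp this
    have hg : (pvInit P).getD kv.1 0 = kv.2 := by
      refine PySem.Dict.getD_of_mem_items _ ?_ (pv_keys_init_nodup P) 0
      simpa using hkv
    have hg2 := pv_getD_init P kv.1 hmemk
    have hv : kv.2 = ((pvLast P kv.1 : Nat) : Int) + 1 := by rw [← hg, hg2]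
    have hlt := pvLast_lt P hmemk
    refine ⟨by omega, by omega, ?_⟩
    rw [hv, show (((pvLast P kv.1 : Nat) : Int) + 1 - 1).toNat = pvLast P kv.1 from by omega,
      List.getD_eq_getElem _ "" hlt, getElem_pvLast P hmemk]
  · intro q hq
    rw [PySem.Dict.contains_eq_decide_mem_keys, pv_keys_init]
    exact decide_eq_true_iff.mpr ((PySem.Set.mem_ofList P q).mpr hq)

-- ===== VERDICT (by name: the statement is the Claim_ definition above) =====
theorem solution_spec : Claim_equal_solution := by
  intro P cs _dom hpre
  unfold Spec_solution
  simp only [solution, solution_alt]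
  rw [PySem.List.foldl_prod_mk
    (f := fun (d : PySem.Dict String Int) (ip : Int × String) => d.insert ip.2 (ip.1 + 1))
    (g := fun (d : PySem.Dict Int String) (ip : Int × String) => d.insert (ip.1 + 1) ip.2)]
  have hrp0 : ((PySem.List.enumerate P 0).foldl (fun d ip => d.insert (ip.1 + 1) ip.2)
        PySem.Dict.empty).items
      = (List.range P.length).map (fun (i : Nat) => ((i : Int) + 1, P.getD i "")) :=
    pv_rp0_items P
  obtain ⟨hAB, _hitemsF, hinvF⟩ := pv_loop P.length cs P (pvInit P)
    ((PySem.List.enumerate P 0).foldl (fun d ip => d.insert (ip.1 + 1) ip.2) PySem.Dict.empty)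
    (pv_inv_init P) hrp0 hpre
  rw [show ((PySem.List.enumerate P 0).foldl (fun d ip => d.insert ip.2 (ip.1 + 1))
      PySem.Dict.empty) = pvInit P from rfl]
  rw [hAB]
  exact pv_final P.length (cs.foldl pvStepB (P, pvInit P)).1
    (cs.foldl pvStepB (P, pvInit P)).2 hinvF
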